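-- pv_equiv track=rewrite | github.com/jortgutter/Thesis | plotting.py | get_running_avg
-- ===== SOURCE A (Python) =====
-- def get_running_avg(move_log, bin_size):
--     running_avgs = [[], [], []]
--
--     for i in range(len(move_log) - bin_size):
--         slce = move_log[i:i+bin_size]
--         for j in range(3):
--             slce_count = 0
--             for k in range(bin_size):
--                 if slce[k] == j:
--                     slce_count += 1
--             running_avgs[j].append(slce_count)
--     return running_avgs
-- ===== SOURCE B (Python) =====
-- def get_running_avg(move_log, bin_size):
--     running_avgs = [[], [], []]
--     counts = [0, 0, 0]
--     for v in move_log[:bin_size]: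
--         if 0 <= v < 3:
--             counts[v] += 1
--     for i in range(len(move_log) - bin_size):
--         for j in range(3):
--             running_avgs[j].append(counts[j])
--         gone = move_log[i]
--         new = move_log[i + bin_size]
--         if 0 <= gone < 3:
--             counts[gone] -= 1
--         if 0 <= new < 3:
--             counts[new] += 1
--     return running_avgs
-- ===== Notes on version B (the rewrite author's own statement) =====
-- stated objective: faster
-- what changed: Replaces the per-window re-slice and re-scan (count each window from scratch) by an incremental sliding window that maintains the three counts, subtracting the element that leaves and adding the one that enters.
-- outside the precondition, e.g. on get_running_avg([0, 1], -1): A returns [[0, 0, 0], [0, 0, 0], [0, 0, 0]], B raises IndexError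
import Mathlib
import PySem

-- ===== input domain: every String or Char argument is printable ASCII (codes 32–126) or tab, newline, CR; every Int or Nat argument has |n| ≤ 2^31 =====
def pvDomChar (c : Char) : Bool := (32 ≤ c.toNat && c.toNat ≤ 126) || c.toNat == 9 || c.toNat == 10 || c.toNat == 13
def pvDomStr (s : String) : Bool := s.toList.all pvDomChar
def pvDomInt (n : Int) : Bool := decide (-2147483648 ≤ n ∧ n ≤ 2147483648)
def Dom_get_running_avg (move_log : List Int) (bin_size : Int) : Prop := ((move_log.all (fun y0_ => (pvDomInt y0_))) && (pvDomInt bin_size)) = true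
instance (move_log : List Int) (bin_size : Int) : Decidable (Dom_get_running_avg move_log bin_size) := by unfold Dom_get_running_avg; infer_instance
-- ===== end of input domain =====

-- B replaces A's per-window re-slice-and-recount by an incremental sliding window that
-- maintains the three counts (objective: faster).

-- ===== PORT A =====
def get_running_avg (move_log : List Int) (bin_size : Int) : List (List Int) :=
  (PySem.List.pyRange 0 (PySem.List.len move_log - bin_size) 1).foldl
    (fun running_avgs i =>
      let slce := PySem.List.slice move_log (some i) (some (i + bin_size))
      (PySem.List.pyRange 0 3 1).foldl
        (fun ra j =>
          let slce_count : Int :=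
            (PySem.List.pyRange 0 bin_size 1).foldl
              (fun c k => if PySem.List.pyGet? slce k = some j then c + 1 else c) 0
          PySem.List.pySetD ra j (PySem.List.pyGetD ra j [] ++ [slce_count]))
        running_avgs)
    [[], [], []]

-- ===== PORT B =====
def get_running_avg_alt (move_log : List Int) (bin_size : Int) : List (List Int) :=
  let counts : List Int :=
    (PySem.List.slice move_log none (some bin_size)).foldl
      (fun cs v =>
        if 0 ≤ v ∧ v < 3 then PySem.List.pySetD cs v (PySem.List.pyGetD cs v 0 + 1) else cs)
      [0, 0, 0]
  let st :=
    (PySem.List.pyRange 0 (PySem.List.len move_log - bin_size) 1).foldl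
      (fun (st : List (List Int) × List Int) i =>
        let ra :=
          (PySem.List.pyRange 0 3 1).foldl
            (fun ra j =>
              PySem.List.pySetD ra j (PySem.List.pyGetD ra j [] ++ [PySem.List.pyGetD st.2 j 0]))
            st.1
        let gone := PySem.List.pyGetD move_log i 0
        let nw := PySem.List.pyGetD move_log (i + bin_size) 0
        let cs1 :=
          if 0 ≤ gone ∧ gone < 3 then
            PySem.List.pySetD st.2 gone (PySem.List.pyGetD st.2 gone 0 - 1) else st.2
        let cs2 :=
          if 0 ≤ nw ∧ nw < 3 then
            PySem.List.pySetD cs1 nw (PySem.List.pyGetD cs1 nw 0 + 1) else cs1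
        (ra, cs2))
      ([[], [], []], counts)
  st.1

-- ===== PRECONDITION & SPEC =====
-- Pre_ excludes negative bin_size, outside the task's natural domain: there A's empty inner
-- range accidentally returns all-zero rows, while B's sliding window raises IndexError.
def Pre_get_running_avg (move_log : List Int) (bin_size : Int) : Prop := 0 ≤ bin_size
instance (move_log : List Int) (bin_size : Int) : Decidable (Pre_get_running_avg move_log bin_size) := by unfold Pre_get_running_avg; infer_instance
def pvWitness_get_running_avg : List Int × Int := ([0, 1, 2, 0, 1], 2)

def Spec_get_running_avg (move_log : List Int) (bin_size : Int) (out : List (List Int)) : Prop := out = get_running_avg_alt move_log bin_size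
instance (move_log : List Int) (bin_size : Int) (out : List (List Int)) : Decidable (Spec_get_running_avg move_log bin_size out) := by unfold Spec_get_running_avg; infer_instance

-- ===== CLAIM (what is proved, stated in full; the proofs are below) =====
def Claim_equal_get_running_avg : Prop := ∀ (move_log : List Int) (bin_size : Int), Dom_get_running_avg move_log bin_size → Pre_get_running_avg move_log bin_size → Spec_get_running_avg move_log bin_size (get_running_avg move_log bin_size)

-- ===== LEMMAS AND PROOFS =====

def wcnt (ml : List Int) (b : Nat) (j : Int) (k : Nat) : Int := (((ml.drop k).take b).count j : Int)

def refOut (ml : List Int) (b : Nat) : List (List Int) :=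
  [(List.range (ml.length - b)).map (wcnt ml b 0),
   (List.range (ml.length - b)).map (wcnt ml b 1),
   (List.range (ml.length - b)).map (wcnt ml b 2)]

def csVec (ml : List Int) (b : Nat) (s : Nat) : List Int :=
  [wcnt ml b 0 s, wcnt ml b 1 s, wcnt ml b 2 s]

def cntA (ml : List Int) (b' : Int) (j : Int) (i : Int) : Int :=
  (PySem.List.pyRange 0 b' 1).foldl
    (fun c t =>
      if PySem.List.pyGet? (PySem.List.slice ml (some i) (some (i + b'))) t = some j
      then c + 1 else c) 0

def bstepN (ml : List Int) (b : Nat) (st : List (List Int) × List Int) (k : Nat) :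
    List (List Int) × List Int :=
  (fun (st : List (List Int) × List Int) (i : Int) =>
    let ra :=
      ([0, 1, 2] : List Int).foldl
        (fun ra j =>
          PySem.List.pySetD ra j (PySem.List.pyGetD ra j [] ++ [PySem.List.pyGetD st.2 j 0]))
        st.1
    let gone := PySem.List.pyGetD ml i 0
    let nw := PySem.List.pyGetD ml (i + (b : Int)) 0
    let cs1 :=
      if 0 ≤ gone ∧ gone < 3 then
        PySem.List.pySetD st.2 gone (PySem.List.pyGetD st.2 gone 0 - 1) else st.2
    let cs2 :=
      if 0 ≤ nw ∧ nw < 3 then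
        PySem.List.pySetD cs1 nw (PySem.List.pyGetD cs1 nw 0 + 1) else cs1
    (ra, cs2)) st ((0 : Int) + (k : Int))

lemma pyRange3 : PySem.List.pyRange 0 3 1 = [0, 1, 2] := by decide

lemma setApp3 (g : Int → Int) (l0 l1 l2 : List Int) :
    ([0, 1, 2] : List Int).foldl
      (fun ra j => PySem.List.pySetD ra j (PySem.List.pyGetD ra j [] ++ [g j])) [l0, l1, l2]
    = [l0 ++ [g 0], l1 ++ [g 1], l2 ++ [g 2]] := by
  simp [List.foldl, PySem.List.pySetD_of_nonneg, PySem.List.pyGetD_of_nonneg]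

lemma foldl_triple {α : Type} (step : List (List Int) → α → List (List Int))
    (g0 g1 g2 : α → Int)
    (hstep : ∀ l0 l1 l2 x, step [l0, l1, l2] x = [l0 ++ [g0 x], l1 ++ [g1 x], l2 ++ [g2 x]]) :
    ∀ (r : List α) (l0 l1 l2 : List Int),
      r.foldl step [l0, l1, l2] = [l0 ++ r.map g0, l1 ++ r.map g1, l2 ++ r.map g2] := by
  intro r
  induction r with
  | nil => intro l0 l1 l2; simp
  | cons x t ih => intro l0 l1 l2; simp [hstep, ih]

lemma countLoop (l : List Int) (j : Int) :
    ∀ c : Int,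
      (List.range l.length).foldl (fun acc t => if l[t]? = some j then acc + 1 else acc) c
        = c + (l.count j : Int) := by
  induction l using List.reverseRecOn with
  | nil => intro c; simp
  | append_singleton l x ih =>
    intro c
    rw [List.length_append, List.length_singleton, List.range_succ, List.foldl_append]
    rw [PySem.List.foldl_congr_mem (List.range l.length)
        (fun acc t => if (l ++ [x])[t]? = some j then acc + 1 else acc)
        (fun acc t => if l[t]? = some j then acc + 1 else acc) c
        (by intro acc t ht
            simp only [List.getElem?_append_left (List.mem_range.mp ht)])]
    rw [ih]
    simp [List.count_append]
    split_ifs with hx <;> simp [hx]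
    omega

-- the per-window count as A computes it

lemma cntA_eq (ml : List Int) (b : Nat) (j : Int) (k : Nat) (hk : k < ml.length - b) :
    cntA ml (b : Int) j (k : Int) = wcnt ml b j k := by
  unfold cntA
  rw [PySem.List.slice_natCast_add]
  set w := (ml.drop k).take b with hwdef
  have hw : w.length = b := by simp [hwdef]; omega
  rw [PySem.List.pyRange_one, List.foldl_map]
  simp only [zero_add, PySem.List.pyGet?_natCast]
  have h1 : ((b : Int) - 0).toNat = w.length := by omega
  rw [h1, countLoop]
  simp [wcnt, hwdef]

lemma A_char (ml : List Int) (b' : Int) (hb : 0 ≤ b') :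
    get_running_avg ml b' = refOut ml b'.toNat := by
  obtain ⟨b, rfl⟩ : ∃ b : Nat, b' = (b : Int) := ⟨b'.toNat, (Int.toNat_of_nonneg hb).symm⟩
  unfold get_running_avg
  simp only [PySem.List.len_eq]
  have hstep : ∀ (l0 l1 l2 : List Int) (i : Int),
      (fun (running_avgs : List (List Int)) (i : Int) =>
        let slce := PySem.List.slice ml (some i) (some (i + (b : Int)))
        (PySem.List.pyRange 0 3 1).foldl
          (fun ra j =>
            let slce_count : Int :=
              (PySem.List.pyRange 0 (b : Int) 1).foldl
                (fun c k => if PySem.List.pyGet? slce k = some j then c + 1 else c) 0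
            PySem.List.pySetD ra j (PySem.List.pyGetD ra j [] ++ [slce_count]))
          running_avgs) [l0, l1, l2] i
      = [l0 ++ [cntA ml (b : Int) 0 i], l1 ++ [cntA ml (b : Int) 1 i], l2 ++ [cntA ml (b : Int) 2 i]] := by
    intro l0 l1 l2 i
    simp only []
    rw [pyRange3]
    exact setApp3 (fun j => cntA ml (b : Int) j i) l0 l1 l2
  rw [foldl_triple _ (cntA ml (b : Int) 0) (cntA ml (b : Int) 1) (cntA ml (b : Int) 2) hstep
      (PySem.List.pyRange 0 ((ml.length : Int) - (b : Int)) 1) [] [] []]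
  simp only [List.nil_append, refOut, Int.toNat_natCast]
  have hrow : ∀ j : Int,
      (PySem.List.pyRange 0 ((ml.length : Int) - (b : Int)) 1).map (cntA ml (b : Int) j)
      = (List.range (ml.length - b)).map (wcnt ml b j) := by
    intro j
    rw [PySem.List.pyRange_one, List.map_map]
    rw [show (((ml.length : Int) - (b : Int)) - 0).toNat = ml.length - b from by omega]
    refine List.map_congr_left (fun k hk => ?_)
    have hk' : k < ml.length - b := List.mem_range.mp hk
    simp only [Function.comp_apply, zero_add]
    exact cntA_eq ml b j k hk'
  rw [hrow 0, hrow 1, hrow 2]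

lemma adj3_dec (c0 c1 c2 v : Int) :
    (if 0 ≤ v ∧ v < 3 then
        PySem.List.pySetD [c0, c1, c2] v (PySem.List.pyGetD [c0, c1, c2] v 0 - 1)
      else [c0, c1, c2])
    = [c0 - (if v = 0 then 1 else 0), c1 - (if v = 1 then 1 else 0), c2 - (if v = 2 then 1 else 0)] := by
  by_cases h : 0 ≤ v ∧ v < 3
  · obtain ⟨h1, h2⟩ := h
    interval_cases v <;> simp [PySem.List.pySetD_of_nonneg, PySem.List.pyGetD_of_nonneg]
  · rw [if_neg h]
    have h0 : v ≠ 0 := by omega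
    have h1 : v ≠ 1 := by omega
    have h2 : v ≠ 2 := by omega
    simp [h0, h1, h2]

lemma adj3_inc (c0 c1 c2 v : Int) :
    (if 0 ≤ v ∧ v < 3 then
        PySem.List.pySetD [c0, c1, c2] v (PySem.List.pyGetD [c0, c1, c2] v 0 + 1)
      else [c0, c1, c2])
    = [c0 + (if v = 0 then 1 else 0), c1 + (if v = 1 then 1 else 0), c2 + (if v = 2 then 1 else 0)] := by
  by_cases h : 0 ≤ v ∧ v < 3
  · obtain ⟨h1, h2⟩ := h
    interval_cases v <;> simp [PySem.List.pySetD_of_nonneg, PySem.List.pyGetD_of_nonneg]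
  · rw [if_neg h]
    have h0 : v ≠ 0 := by omega
    have h1 : v ≠ 1 := by omega
    have h2 : v ≠ 2 := by omega
    simp [h0, h1, h2]

lemma counts_init (l : List Int) :
    ∀ c0 c1 c2 : Int,
      l.foldl (fun cs v =>
          if 0 ≤ v ∧ v < 3 then PySem.List.pySetD cs v (PySem.List.pyGetD cs v 0 + 1) else cs)
        [c0, c1, c2]
      = [c0 + (l.count 0 : Int), c1 + (l.count 1 : Int), c2 + (l.count 2 : Int)] := by
  induction l with
  | nil => intro c0 c1 c2; simp
  | cons v t ih =>
    intro c0 c1 c2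
    rw [List.foldl_cons, adj3_inc, ih]
    simp [List.count_cons]
    refine ⟨?_, ?_, ?_⟩ <;> split_ifs <;> omega

lemma wcnt_slide (ml : List Int) (b : Nat) (s : Nat) (h : s + b < ml.length) (j : Int) :
    wcnt ml b j s - (if ml.getD s 0 = j then 1 else 0)
      + (if ml.getD (s + b) 0 = j then 1 else 0) = wcnt ml b j (s + 1) := by
  have hs : s < ml.length := by omega
  cases b with
  | zero => simp [wcnt]
  | succ c =>
    have hdrop : ml.drop s = ml[s] :: ml.drop (s + 1) := List.drop_eq_getElem_cons hs
    have hlen : c < (ml.drop (s + 1)).length := by simp; omega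
    have htake : (ml.drop (s + 1)).take (c + 1)
        = (ml.drop (s + 1)).take c ++ [(ml.drop (s + 1))[c]] := by
      rw [List.take_add_one, List.getElem?_eq_getElem hlen]; rfl
    have hgd1 : ml.getD s 0 = ml[s] := List.getD_eq_getElem ml 0 hs
    have hgd2 : ml.getD (s + (c + 1)) 0 = (ml.drop (s + 1))[c] := by
      rw [List.getElem_drop, List.getD_eq_getElem ml 0 (by omega)]
      congr 1; omega
    unfold wcnt
    rw [hgd1, hgd2, hdrop, List.take_succ_cons, htake]
    simp [List.count_append, List.count_cons, beq_iff_eq]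

lemma foldl_pair (step : (List (List Int) × List Int) → Nat → (List (List Int) × List Int))
    (cs : Nat → List Int) (g0 g1 g2 : Nat → Int) (M : Nat)
    (hstep : ∀ l0 l1 l2 s, s < M →
      step ([l0, l1, l2], cs s) s = ([l0 ++ [g0 s], l1 ++ [g1 s], l2 ++ [g2 s]], cs (s + 1))) :
    ∀ (t s : Nat), s + t ≤ M → ∀ l0 l1 l2,
      (List.range' s t).foldl step ([l0, l1, l2], cs s)
        = ([l0 ++ (List.range' s t).map g0, l1 ++ (List.range' s t).map g1,
            l2 ++ (List.range' s t).map g2], cs (s + t)) := by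
  intro t
  induction t with
  | zero => intro s hs l0 l1 l2; simp
  | succ t ih =>
    intro s hs l0 l1 l2
    rw [List.range'_succ, List.foldl_cons, hstep l0 l1 l2 s (by omega),
        ih (s + 1) (by omega)]
    simp only [List.map_cons]
    rw [show s + 1 + t = s + (t + 1) from by omega]
    simp

lemma bstepN_eq (ml : List Int) (b : Nat) (l0 l1 l2 : List Int) (s : Nat)
    (hs : s < ml.length - b) :
    bstepN ml b ([l0, l1, l2], csVec ml b s) s
      = ([l0 ++ [wcnt ml b 0 s], l1 ++ [wcnt ml b 1 s], l2 ++ [wcnt ml b 2 s]],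
         csVec ml b (s + 1)) := by
  have hsb : s + b < ml.length := by omega
  have hcast : ((s : Int) + (b : Int)) = ((s + b : Nat) : Int) := by push_cast; ring
  unfold bstepN
  simp only [zero_add, csVec, setApp3, hcast, PySem.List.pyGetD_natCast, adj3_dec, adj3_inc]
  rw [wcnt_slide ml b s hsb 0, wcnt_slide ml b s hsb 1, wcnt_slide ml b s hsb 2]
  norm_num [PySem.List.pyGetD_of_nonneg, show Int.toNat 2 = 2 from rfl]

lemma B_char (ml : List Int) (b' : Int) (hb : 0 ≤ b') :
    get_running_avg_alt ml b' = refOut ml b'.toNat := by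
  obtain ⟨b, rfl⟩ : ∃ b : Nat, b' = (b : Int) := ⟨b'.toNat, (Int.toNat_of_nonneg hb).symm⟩
  unfold get_running_avg_alt
  simp only [PySem.List.len_eq]
  rw [PySem.List.slice_to ml (by positivity), Int.toNat_natCast, counts_init]
  have hcs0 : [0 + ((ml.take b).count 0 : Int), 0 + ((ml.take b).count 1 : Int),
      0 + ((ml.take b).count 2 : Int)] = csVec ml b 0 := by
    simp [csVec, wcnt]
  rw [hcs0, pyRange3, PySem.List.pyRange_one, List.foldl_map]
  rw [show (((ml.length : Int) - (b : Int)) - 0).toNat = ml.length - b from by omega]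
  rw [List.range_eq_range']
  show (List.foldl (bstepN ml b) ([[], [], []], csVec ml b 0)
      (List.range' 0 (ml.length - b))).1 = refOut ml b
  rw [foldl_pair (bstepN ml b) (csVec ml b) (wcnt ml b 0) (wcnt ml b 1) (wcnt ml b 2)
      (ml.length - b) (fun l0 l1 l2 s hs => bstepN_eq ml b l0 l1 l2 s hs)
      (ml.length - b) 0 (by omega) [] [] []]
  simp [refOut, List.range_eq_range']

-- ===== VERDICT (by name: the statement is the Claim_ definition above) =====
theorem get_running_avg_spec : Claim_equal_get_running_avg := by
  intro ml b _ hb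
  unfold Spec_get_running_avg
  rw [A_char ml b hb, B_char ml b hb]
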